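-- pv_equiv track=rewrite | github.com/shuzhao-li-lab/LUNA | LUNA.py | _build_packing_config
-- ===== SOURCE A (Python) =====
-- def _build_packing_config(keys, limits):
--     config = {}
--     current_mult = 1
--     for k in keys:
--         limit = limits[k]['limit']
--         config[k] = {'mult': current_mult, 'limit': limit, 'delta': limits[k]['delta']}
--         current_mult *= (limit + 1)
--     return config
-- ===== SOURCE B (Python) =====
-- def _build_packing_config(keys, limits):
--     # Each key's multiplier is computed independently as the product of
--     # (limit+1) over the keys preceding it, instead of a running accumulator.
--     def mult_at(i):
--         p = 1
--         for kk in keys[:i]: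
--             p *= limits[kk]['limit'] + 1
--         return p
--     return {k: {'mult': mult_at(i),
--                 'limit': limits[k]['limit'],
--                 'delta': limits[k]['delta']}
--             for i, k in enumerate(keys)}
-- ===== Notes on version B (the rewrite author's own statement) =====
-- stated objective: alternative
-- what changed: B drops A's running-product accumulator entirely: it builds the dict in one comprehension over enumerate(keys), recomputing each key's multiplier independently as a brute-force product of (limit+1) over the key's prefix keys[:i].
import Mathlib
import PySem

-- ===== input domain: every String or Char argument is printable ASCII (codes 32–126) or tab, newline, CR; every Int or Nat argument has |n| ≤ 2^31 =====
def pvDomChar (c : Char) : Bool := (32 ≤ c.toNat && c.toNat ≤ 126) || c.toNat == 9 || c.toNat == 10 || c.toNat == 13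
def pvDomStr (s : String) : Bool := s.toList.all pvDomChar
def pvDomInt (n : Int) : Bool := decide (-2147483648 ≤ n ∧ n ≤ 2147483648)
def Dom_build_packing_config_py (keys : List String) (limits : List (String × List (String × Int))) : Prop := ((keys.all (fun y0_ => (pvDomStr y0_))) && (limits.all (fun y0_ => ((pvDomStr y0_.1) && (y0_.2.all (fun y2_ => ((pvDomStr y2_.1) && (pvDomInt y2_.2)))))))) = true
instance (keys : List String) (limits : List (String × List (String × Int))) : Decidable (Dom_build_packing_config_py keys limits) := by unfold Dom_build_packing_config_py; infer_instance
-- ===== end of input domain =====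

-- B replaces A's running-product accumulator by a brute-force recomputation: each key's
-- multiplier is the product of (limit+1) over its prefix keys[:i], assembled in one
-- comprehension over enumerate(keys) (alternative decomposition, not faster).

-- shared lookup helpers: limits[k]['limit'] / limits[k]['delta'] (defaults unreachable inside Pre_)
def pvLimitOf (limits : List (String × List (String × Int))) (k : String) : Int :=
  (PySem.Dict.mk ((PySem.Dict.mk limits).getD k [])).getD "limit" 0
def pvDeltaOf (limits : List (String × List (String × Int))) (k : String) : Int :=
  (PySem.Dict.mk ((PySem.Dict.mk limits).getD k [])).getD "delta" 0

-- ===== PORT A =====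
-- one fused loop carrying (config, current_mult)
def build_packing_config_py (keys : List String) (limits : List (String × List (String × Int))) : List (String × List (String × Int)) :=
  (keys.foldl
    (fun (st : PySem.Dict String (List (String × Int)) × Int) k =>
      let limit := pvLimitOf limits k
      (st.1.insert k [("mult", st.2), ("limit", limit), ("delta", pvDeltaOf limits k)],
       st.2 * (limit + 1)))
    (PySem.Dict.empty, 1)).1.items

-- ===== PORT B =====
-- mult_at(i): brute-force product over the slice keys[:i]
def pvMultAt (keys : List String) (limits : List (String × List (String × Int))) (i : Int) : Int :=
  (PySem.List.slice keys none (some i)).foldl (fun p kk => p * (pvLimitOf limits kk + 1)) 1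
-- the dict comprehension over enumerate(keys)
def build_packing_config_py_alt (keys : List String) (limits : List (String × List (String × Int))) : List (String × List (String × Int)) :=
  ((PySem.List.enumerate keys 0).foldl
    (fun (d : PySem.Dict String (List (String × Int))) p =>
      d.insert p.2 [("mult", pvMultAt keys limits p.1),
                    ("limit", pvLimitOf limits p.2),
                    ("delta", pvDeltaOf limits p.2)])
    PySem.Dict.empty).items

-- ===== PRECONDITION & SPEC =====
-- Pre_ excludes exactly the inputs where Python A raises KeyError: a key of `keys` missing
-- from `limits`, or its entry missing 'limit' or 'delta'.
def Pre_build_packing_config_py (keys : List String) (limits : List (String × List (String × Int))) : Prop :=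
  (keys.all (fun k =>
    match (PySem.Dict.mk limits).get? k with
    | some inner => (PySem.Dict.mk inner).contains "limit" && (PySem.Dict.mk inner).contains "delta"
    | none => false)) = true
instance (keys : List String) (limits : List (String × List (String × Int))) : Decidable (Pre_build_packing_config_py keys limits) := by unfold Pre_build_packing_config_py; infer_instance
def pvWitness_build_packing_config_py : List String × (List (String × List (String × Int))) :=
  (["a"], [("a", [("limit", 2), ("delta", 1)])])
def Spec_build_packing_config_py (keys : List String) (limits : List (String × List (String × Int))) (out : List (String × List (String × Int))) : Prop := out = build_packing_config_py_alt keys limits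
instance (keys : List String) (limits : List (String × List (String × Int))) (out : List (String × List (String × Int))) : Decidable (Spec_build_packing_config_py keys limits out) := by unfold Spec_build_packing_config_py; infer_instance

-- ===== CLAIM (what is proved, stated in full; the proofs are below) =====
def Claim_equal_build_packing_config_py : Prop := ∀ (keys : List String) (limits : List (String × List (String × Int))), Dom_build_packing_config_py keys limits → Pre_build_packing_config_py keys limits → Spec_build_packing_config_py keys limits (build_packing_config_py keys limits)

-- ===== LEMMAS AND PROOFS =====

-- the product of (limit+1) over a list of keys
def pvProdOf (limits : List (String × List (String × Int))) (l : List String) : Int :=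
  l.foldl (fun p kk => p * (pvLimitOf limits kk + 1)) 1

theorem pvProdOf_append_singleton (limits : List (String × List (String × Int))) (l : List String) (k : String) :
    pvProdOf limits (l ++ [k]) = pvProdOf limits l * (pvLimitOf limits k + 1) := by
  simp [pvProdOf, List.foldl_append]

-- on a prefix decomposition kl = pref ++ ks, mult_at |pref| is exactly the product over pref
theorem pvMultAt_prefix (limits : List (String × List (String × Int))) (pref ks : List String) :
    pvMultAt (pref ++ ks) limits (pref.length : Int) = pvProdOf limits pref := by
  unfold pvMultAt pvProdOf
  rw [PySem.List.slice_to_natCast, List.take_left]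

-- core invariant: A's fused loop from state (d, prod pref) equals B's enumerate-fold from d
theorem pv_main (limits : List (String × List (String × Int))) (kl : List String) :
    ∀ (ks pref : List String), kl = pref ++ ks → ∀ (d : PySem.Dict String (List (String × Int))),
      (ks.foldl
        (fun (st : PySem.Dict String (List (String × Int)) × Int) k =>
          let limit := pvLimitOf limits k
          (st.1.insert k [("mult", st.2), ("limit", limit), ("delta", pvDeltaOf limits k)],
           st.2 * (limit + 1)))
        (d, pvProdOf limits pref)).1
      = (PySem.List.enumerate ks (pref.length : Int)).foldl
          (fun (d : PySem.Dict String (List (String × Int))) p =>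
            d.insert p.2 [("mult", pvMultAt kl limits p.1),
                          ("limit", pvLimitOf limits p.2),
                          ("delta", pvDeltaOf limits p.2)])
          d := by
  intro ks
  induction ks with
  | nil => intro pref _ d; rfl
  | cons k t ih =>
    intro pref hkl d
    rw [PySem.List.enumerate_cons]
    simp only [List.foldl_cons]
    have hm : pvMultAt kl limits (pref.length : Int) = pvProdOf limits pref := by
      rw [hkl]; exact pvMultAt_prefix limits pref (k :: t)
    rw [hm]
    have hstep : pvProdOf limits pref * (pvLimitOf limits k + 1) = pvProdOf limits (pref ++ [k]) :=
      (pvProdOf_append_singleton limits pref k).symm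
    have hkl' : kl = (pref ++ [k]) ++ t := by simp [hkl]
    have hlen : (pref.length : Int) + 1 = ((pref ++ [k]).length : Int) := by
      simp [List.length_append]
    rw [hstep, hlen]
    exact ih (pref ++ [k]) hkl'
      (d.insert k [("mult", pvProdOf limits pref), ("limit", pvLimitOf limits k),
                   ("delta", pvDeltaOf limits k)])

-- ===== VERDICT (by name: the statement is the Claim_ definition above) =====
theorem build_packing_config_py_spec : Claim_equal_build_packing_config_py := by
  intro keys limits _ _
  unfold Spec_build_packing_config_py build_packing_config_py build_packing_config_py_alt
  have h := pv_main limits keys keys [] rfl PySem.Dict.empty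
  simp only [pvProdOf, List.foldl_nil, List.length_nil, Int.natCast_zero] at h
  rw [h]
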